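-- pv_equiv track=rewrite | github.com/skipp-dev/skipp-algo | smc_integration/sources/databento_watchlist_csv.py | _select_symbol_row
-- ===== SOURCE A (Python) =====
-- def _select_symbol_row(rows: list[dict[str, str]], symbol: str) -> dict[str, str]:
--     wanted = symbol.strip().upper()
--     if not wanted:
--         raise ValueError("symbol must not be empty")
--
--     matching = [row for row in rows if str(row.get("symbol", "")).strip().upper() == wanted]
--     if not matching:
--         raise ValueError(f"symbol {wanted} not present in watchlist source")
--
--     latest_trade_date = max(str(row.get("trade_date", "")).strip() for row in matching)
--     latest_rows = [row for row in matching if str(row.get("trade_date", "")).strip() == latest_trade_date]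
--
--     def _rank_value(row: dict[str, str]) -> int:
--         raw = str(row.get("watchlist_rank", "")).strip()
--         try:
--             return int(raw)
--         except ValueError:
--             return 10**9
--
--     return sorted(latest_rows, key=_rank_value)[0]
-- ===== SOURCE B (Python) =====
-- def _select_symbol_row(rows: list[dict[str, str]], symbol: str) -> dict[str, str]:
--     wanted = symbol.strip().upper()
--     if not wanted:
--         raise ValueError("symbol must not be empty")
--
--     best = None  # (trade_date, rank, row); strict comparisons keep the earliest row on ties
--     for row in rows:
--         if str(row.get("symbol", "")).strip().upper() != wanted:
--             continue
--         date = str(row.get("trade_date", "")).strip()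
--         raw = str(row.get("watchlist_rank", "")).strip()
--         try:
--             rank = int(raw)
--         except ValueError:
--             rank = 10**9
--         if best is None or date > best[0] or (date == best[0] and rank < best[1]):
--             best = (date, rank, row)
--
--     if best is None:
--         raise ValueError(f"symbol {wanted} not present in watchlist source")
--     return best[2]
-- ===== Notes on version B (the rewrite author's own statement) =====
-- stated objective: simpler
-- what changed: Replaced the three filtering/max/sort passes with a single loop that keeps the best (latest trade_date, then lowest rank, first-wins) matching row.
import Mathlib
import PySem

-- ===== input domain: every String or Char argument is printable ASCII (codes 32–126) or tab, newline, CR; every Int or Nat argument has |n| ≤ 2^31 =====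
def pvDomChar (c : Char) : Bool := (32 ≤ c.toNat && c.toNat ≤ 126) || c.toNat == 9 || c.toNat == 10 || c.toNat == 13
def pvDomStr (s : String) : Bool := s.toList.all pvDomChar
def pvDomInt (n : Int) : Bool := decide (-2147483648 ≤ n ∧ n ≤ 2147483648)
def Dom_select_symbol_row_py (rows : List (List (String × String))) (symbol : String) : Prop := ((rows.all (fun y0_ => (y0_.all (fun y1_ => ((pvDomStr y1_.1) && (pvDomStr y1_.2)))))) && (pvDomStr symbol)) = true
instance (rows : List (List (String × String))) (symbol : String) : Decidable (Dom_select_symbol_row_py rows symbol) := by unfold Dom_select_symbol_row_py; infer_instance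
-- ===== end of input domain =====

-- B replaces A's three passes (filter, max+filter, sort) by one loop keeping the best row; objective: simpler.

-- shared field accessors (both Pythons extract fields with the same expressions)
def pvField (row : List (String × String)) (k : String) : String :=
  PySem.Dict.getD (PySem.Dict.mk row) k ""

def pvSym (row : List (String × String)) : String :=
  PySem.Str.upper (PySem.Str.strip (pvField row "symbol"))

def pvDate (row : List (String × String)) : String :=
  PySem.Str.strip (pvField row "trade_date")

def pvRank (row : List (String × String)) : Int :=
  match PySem.Int.ofStr? (PySem.Str.strip (pvField row "watchlist_rank")) with
  | some n => n
  | none => 10 ^ 9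

-- ===== PORT A =====
def select_symbol_row_py (rows : List (List (String × String))) (symbol : String) : List (String × String) :=
  let wanted := PySem.Str.upper (PySem.Str.strip symbol)
  if wanted = "" then []
  else
    let matching := rows.filter (fun row => pvSym row == wanted)
    if matching = [] then []
    else
      let latest := (PySem.List.max? (matching.map (fun row => pvDate row)) (fun x => x)).getD ""
      let latest_rows := matching.filter (fun row => pvDate row == latest)
      (PySem.List.sorted latest_rows pvRank).headD []

-- ===== PORT B =====
def pvBLoop (wanted : String) (rows : List (List (String × String)))
    (best : Option (String × Int × List (String × String))) : List (String × String) :=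
  match rows with
  | [] => match best with | some b => b.2.2 | none => []
  | r :: rest =>
    if pvSym r = wanted then
      let d := pvDate r
      let rk := pvRank r
      match best with
      | none => pvBLoop wanted rest (some (d, rk, r))
      | some (bd, brk, br) =>
        if bd < d ∨ (bd = d ∧ rk < brk) then pvBLoop wanted rest (some (d, rk, r))
        else pvBLoop wanted rest (some (bd, brk, br))
    else pvBLoop wanted rest best

def select_symbol_row_py_alt (rows : List (List (String × String))) (symbol : String) : List (String × String) :=
  let wanted := PySem.Str.upper (PySem.Str.strip symbol)
  if wanted = "" then []
  else pvBLoop wanted rows none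

-- ===== PRECONDITION & SPEC =====
-- Pre_ excludes exactly the inputs where A raises ValueError (stripped symbol empty, or no row
-- whose normalized symbol matches); B raises the same ValueError there.
def Pre_select_symbol_row_py (rows : List (List (String × String))) (symbol : String) : Prop :=
  PySem.Str.upper (PySem.Str.strip symbol) ≠ "" ∧
  ∃ row ∈ rows, pvSym row = PySem.Str.upper (PySem.Str.strip symbol)

instance (rows : List (List (String × String))) (symbol : String) : Decidable (Pre_select_symbol_row_py rows symbol) := by
  unfold Pre_select_symbol_row_py; infer_instance

def pvWitness_select_symbol_row_py : (List (List (String × String))) × String :=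
  ([[("symbol", "AAPL"), ("trade_date", "2024-01-02"), ("watchlist_rank", "1")]], "aapl")

def Spec_select_symbol_row_py (rows : List (List (String × String))) (symbol : String) (out : List (String × String)) : Prop := out = select_symbol_row_py_alt rows symbol
instance (rows : List (List (String × String))) (symbol : String) (out : List (String × String)) : Decidable (Spec_select_symbol_row_py rows symbol out) := by unfold Spec_select_symbol_row_py; infer_instance

-- ===== CLAIM (what is proved, stated in full; the proofs are below) =====
def Claim_equal_select_symbol_row_py : Prop := ∀ (rows : List (List (String × String))) (symbol : String), Dom_select_symbol_row_py rows symbol → Pre_select_symbol_row_py rows symbol → Spec_select_symbol_row_py rows symbol (select_symbol_row_py rows symbol)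

-- ===== LEMMAS AND PROOFS =====

-- the pure one-row update step B's loop performs, and the min-rank step
def pvRstep (b r : List (String × String)) : List (String × String) :=
  if pvDate b < pvDate r ∨ (pvDate b = pvDate r ∧ pvRank r < pvRank b) then r else b

def pvMstep (b r : List (String × String)) : List (String × String) :=
  if pvRank r < pvRank b then r else b

theorem pvBLoop_filter (wanted : String) (rows : List (List (String × String)))
    (best : Option (String × Int × List (String × String))) :
    pvBLoop wanted rows best = pvBLoop wanted (rows.filter (fun r => pvSym r == wanted)) best := by
  induction rows generalizing best with
  | nil => rfl
  | cons r rest ih =>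
    by_cases h : pvSym r = wanted
    · simp [pvBLoop, h, ih]
    · simp [pvBLoop, h, ih]

theorem pvBLoop_fold (wanted : String) (t : List (List (String × String)))
    (b : List (String × String)) (h : ∀ r ∈ t, pvSym r = wanted) :
    pvBLoop wanted t (some (pvDate b, pvRank b, b)) = t.foldl pvRstep b := by
  induction t generalizing b with
  | nil => rfl
  | cons r rest ih =>
    have hr : pvSym r = wanted := h r (by simp)
    have hrest : ∀ x ∈ rest, pvSym x = wanted := fun x hx => h x (by simp [hx])
    simp only [pvBLoop, hr, if_pos, List.foldl_cons, pvRstep, ih _ hrest]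
    split <;> rfl

theorem head_foldl_insertBy (xs : List (List (String × String)))
    (h : List (String × String)) (acc : List (List (String × String))) (d : List (String × String)) :
    ((xs.foldl (fun acc x => PySem.List.insertBy (fun a b => decide (pvRank a < pvRank b)) x acc)
        (h :: acc)).headD d) = xs.foldl pvMstep h := by
  induction xs generalizing h acc with
  | nil => rfl
  | cons y ys ih =>
    by_cases hc : pvRank y < pvRank h
    · rw [List.foldl_cons]
      have hins : PySem.List.insertBy (fun a b => decide (pvRank a < pvRank b)) y (h :: acc)
          = y :: h :: acc := by simp [PySem.List.insertBy, hc]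
      rw [hins, ih y (h :: acc), List.foldl_cons, pvMstep, if_pos hc]
    · rw [List.foldl_cons]
      have hins : PySem.List.insertBy (fun a b => decide (pvRank a < pvRank b)) y (h :: acc)
          = h :: PySem.List.insertBy (fun a b => decide (pvRank a < pvRank b)) y acc := by
        simp [PySem.List.insertBy, hc]
      rw [hins, ih h _, List.foldl_cons, pvMstep, if_neg hc]

theorem head_sorted (x : List (String × String)) (xs : List (List (String × String)))
    (d : List (String × String)) :
    (PySem.List.sorted (x :: xs) pvRank).headD d = xs.foldl pvMstep x := by
  rw [PySem.List.sorted_eq_foldl_insertBy]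
  simpa [PySem.List.insertBy] using head_foldl_insertBy xs x [] d

theorem pvDate_rstep (x z : List (String × String)) :
    pvDate (pvRstep x z) = max (pvDate x) (pvDate z) := by
  unfold pvRstep
  rcases lt_trichotomy (pvDate x) (pvDate z) with h | h | h
  · rw [if_pos (Or.inl h), max_eq_right (le_of_lt h)]
  · by_cases hr : pvRank z < pvRank x
    · rw [if_pos (Or.inr ⟨h, hr⟩), h, max_self]
    · rw [if_neg, h, max_self]
      rintro (hlt | ⟨-, hlt⟩)
      · rw [h] at hlt; exact lt_irrefl _ hlt
      · exact hr hlt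
  · rw [if_neg, max_eq_left (le_of_lt h)]
    rintro (hlt | ⟨heq, -⟩)
    · exact lt_asymm h hlt
    · exact (ne_of_gt h) heq

theorem pv_main (t : List (List (String × String))) (x : List (String × String)) :
    (PySem.List.sorted
        ((x :: t).filter (fun r => pvDate r == (t.map pvDate).foldl max (pvDate x))) pvRank).headD []
      = t.foldl pvRstep x := by
  induction t generalizing x with
  | nil => simp [PySem.List.sorted, PySem.List.insertBy]
  | cons z s ih =>
    have hL : (((z :: s).map pvDate).foldl max (pvDate x))
        = ((s.map pvDate).foldl max (pvDate (pvRstep x z))) := by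
      simp [List.foldl_cons, pvDate_rstep]
    have hbd := PySem.List.le_foldl_max (s.map pvDate) (pvDate (pvRstep x z))
    have hx_le : pvDate x ≤ (s.map pvDate).foldl max (pvDate (pvRstep x z)) :=
      le_trans (by rw [pvDate_rstep]; exact le_max_left _ _) hbd.1
    have hz_le : pvDate z ≤ (s.map pvDate).foldl max (pvDate (pvRstep x z)) :=
      le_trans (by rw [pvDate_rstep]; exact le_max_right _ _) hbd.1
    rw [hL, List.foldl_cons, ← ih (pvRstep x z)]
    by_cases hx : pvDate x = (s.map pvDate).foldl max (pvDate (pvRstep x z)) <;>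
      by_cases hz : pvDate z = (s.map pvDate).foldl max (pvDate (pvRstep x z))
    · -- both at the latest date: dates equal, pvRstep = pvMstep
      have hxz : pvDate x = pvDate z := by rw [hx, hz]
      have hnotlt : ¬ pvDate x < pvDate z := by rw [hxz]; exact lt_irrefl _
      have hstep : pvRstep x z = pvMstep x z := by
        unfold pvRstep pvMstep
        by_cases hr : pvRank z < pvRank x
        · rw [if_pos (Or.inr ⟨hxz, hr⟩), if_pos hr]
        · rw [if_neg, if_neg hr]
          rintro (hlt | ⟨-, hlt⟩)
          · exact hnotlt hlt
          · exact hr hlt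
      have hmaxeq : pvDate (pvRstep x z) = pvDate z := by rw [pvDate_rstep, hxz, max_self]
      have hz2 : pvDate (pvRstep x z) = (s.map pvDate).foldl max (pvDate (pvRstep x z)) := by
        conv_lhs => rw [hmaxeq]
        exact hz
      rw [List.filter_cons, List.filter_cons, List.filter_cons,
        if_pos (beq_iff_eq.mpr hx), if_pos (beq_iff_eq.mpr hz), if_pos (beq_iff_eq.mpr hz2),
        head_sorted, head_sorted, List.foldl_cons, hstep]
    · -- x at the latest date, z strictly earlier: keep x
      have hzlt : pvDate z < pvDate x := by rw [hx]; exact lt_of_le_of_ne hz_le hz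
      have hstep : pvRstep x z = x := by
        unfold pvRstep
        rw [if_neg]
        rintro (hlt | ⟨heq, -⟩)
        · exact lt_asymm hzlt hlt
        · exact (ne_of_gt hzlt) heq
      have hx2 : pvDate (pvRstep x z) = (s.map pvDate).foldl max (pvDate (pvRstep x z)) := by
        conv_lhs => rw [hstep]
        exact hx
      rw [List.filter_cons, List.filter_cons, List.filter_cons,
        if_pos (beq_iff_eq.mpr hx), if_neg (fun hcon => hz (beq_iff_eq.mp hcon)),
        if_pos (beq_iff_eq.mpr hx2), hstep]
    · -- z at the latest date, x strictly earlier: take z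
      have hxlt : pvDate x < pvDate z := by rw [hz]; exact lt_of_le_of_ne hx_le hx
      have hstep : pvRstep x z = z := by unfold pvRstep; rw [if_pos (Or.inl hxlt)]
      have hz2 : pvDate (pvRstep x z) = (s.map pvDate).foldl max (pvDate (pvRstep x z)) := by
        conv_lhs => rw [hstep]
        exact hz
      rw [List.filter_cons, List.filter_cons, List.filter_cons,
        if_neg (fun hcon => hx (beq_iff_eq.mp hcon)), if_pos (beq_iff_eq.mpr hz),
        if_pos (beq_iff_eq.mpr hz2), hstep]
    · -- neither at the latest date: both dropped
      have hx' : ¬ pvDate (pvRstep x z) = (s.map pvDate).foldl max (pvDate (pvRstep x z)) := by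
        rw [pvDate_rstep]
        intro h
        rcases max_choice (pvDate x) (pvDate z) with hm | hm <;> rw [hm] at h
        · exact hx (by rw [h, pvDate_rstep, hm])
        · exact hz (by rw [h, pvDate_rstep, hm])
      rw [List.filter_cons, List.filter_cons, List.filter_cons,
        if_neg (fun hcon => hx (beq_iff_eq.mp hcon)), if_neg (fun hcon => hz (beq_iff_eq.mp hcon)),
        if_neg (fun hcon => hx' (beq_iff_eq.mp hcon))]

-- ===== VERDICT (by name: the statement is the Claim_ definition above) =====
theorem select_symbol_row_py_spec : Claim_equal_select_symbol_row_py := by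
  intro rows symbol _ hpre
  obtain ⟨hne, row0, hrow0, hmatch⟩ := hpre
  unfold Spec_select_symbol_row_py select_symbol_row_py select_symbol_row_py_alt
  simp only [if_neg hne]
  set wanted := PySem.Str.upper (PySem.Str.strip symbol) with hw
  set matching := rows.filter (fun r => pvSym r == wanted) with hm
  have hmne : matching ≠ [] := by
    rw [hm, ← List.isEmpty_eq_false_iff, List.isEmpty_eq_false_iff_exists_mem]
    exact ⟨row0, List.mem_filter.2 ⟨hrow0, by simp [hmatch]⟩⟩
  obtain ⟨x, t, hxt⟩ := List.exists_cons_of_ne_nil hmne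
  have hall : ∀ r ∈ matching, pvSym r = wanted := by
    intro r hr
    have := (List.mem_filter.1 (hm ▸ hr)).2
    simpa using this
  rw [pvBLoop_filter, ← hm, hxt]
  simp only [if_neg (by simp : (x :: t : List _) ≠ [])]
  have hx : pvSym x = wanted := hall x (by rw [hxt]; simp)
  have ht : ∀ r ∈ t, pvSym r = wanted := fun r hr => hall r (by rw [hxt]; simp [hr])
  show (PySem.List.sorted _ pvRank).headD [] = pvBLoop wanted (x :: t) none
  have hB : pvBLoop wanted (x :: t) none = t.foldl pvRstep x := by
    rw [pvBLoop]
    simp only [if_pos hx]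
    exact pvBLoop_fold wanted t x ht
  rw [hB, ← pv_main t x]
  have hmax : (PySem.List.max? ((x :: t).map pvDate) (fun y => y)).getD ""
      = (t.map pvDate).foldl max (pvDate x) := by
    rw [List.map_cons, PySem.List.max?_id_cons, Option.getD_some]
  rw [hmax]
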